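-- pv_equiv track=rewrite | github.com/tzungtzu/algo_puzzles | solutions/14_stairs.py | meet
-- ===== SOURCE A (Python) =====
-- STEP = 4
--
-- def meet(a,b):
-- 	if a>b:
-- 		return 0
-- 	if a==b:
-- 		return 1
--
-- 	cnt = 0
-- 	for x in range(1,STEP):
-- 		for y in range(1,STEP):
-- 			cnt = cnt + meet(a+x, b-y)
-- 	return cnt
-- ===== SOURCE B (Python) =====
-- def meet(a, b):
--     d = b - a
--     if d < 0:
--         return 0
--     w0, w1, w2, w3, w4, w5 = 0, 0, 0, 0, 0, 1
--     for _ in range(d):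
--         w0, w1, w2, w3, w4, w5 = w1, w2, w3, w4, w5, w4 + 2*w3 + 3*w2 + 2*w1 + w0
--     return w5
-- ===== Notes on version B (the rewrite author's own statement) =====
-- stated objective: alternative
-- what changed: Replaced the nine-way unmemoised recursion on (a,b) by a six-value sliding-window DP over d = b - a using the recurrence f(d) = f(d-2)+2f(d-3)+3f(d-4)+2f(d-5)+f(d-6); Pre_ excludes b - a >= 19900, where A's recursion overflows the interpreter recursion limit and raises RecursionError without returning a value.
import Mathlib
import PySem

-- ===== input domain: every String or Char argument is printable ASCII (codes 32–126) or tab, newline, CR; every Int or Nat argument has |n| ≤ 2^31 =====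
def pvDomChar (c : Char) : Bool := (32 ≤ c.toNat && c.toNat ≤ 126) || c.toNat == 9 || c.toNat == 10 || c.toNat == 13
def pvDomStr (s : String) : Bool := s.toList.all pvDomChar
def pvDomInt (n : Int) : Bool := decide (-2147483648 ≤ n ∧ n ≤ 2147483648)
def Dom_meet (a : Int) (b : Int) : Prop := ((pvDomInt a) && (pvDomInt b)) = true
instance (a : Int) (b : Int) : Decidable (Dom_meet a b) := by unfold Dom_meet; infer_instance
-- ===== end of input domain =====

-- B replaces A's nine-way recursion on (a,b) by a sliding-window DP over d = b - a (objective: alternative algorithm).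


-- ===== PORT A =====
-- fuel makes the nine-way recursion total; it is always sufficient (proved below), so behaviour matches A
def meetFuel : Nat → Int → Int → Int
  | 0, _, _ => 0
  | (fuel+1), a, b =>
    if a > b then 0
    else if a = b then 1
    else (PySem.List.pyRange 1 4 1).foldl (fun cnt x =>
           (PySem.List.pyRange 1 4 1).foldl (fun cnt y =>
             cnt + meetFuel fuel (a + x) (b - y)) cnt) 0

def meet (a : Int) (b : Int) : Int := meetFuel ((b - a).toNat + 1) a b

-- ===== PORT B =====
-- one step of the sliding window (w0..w5 = last six DP values)
def meetStep : Int × Int × Int × Int × Int × Int → Int × Int × Int × Int × Int × Int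
  | (w0, w1, w2, w3, w4, w5) => (w1, w2, w3, w4, w5, w4 + 2*w3 + 3*w2 + 2*w1 + w0)

def meetIter : Nat → Int × Int × Int × Int × Int × Int → Int × Int × Int × Int × Int × Int
  | 0, w => w
  | (n+1), w => meetIter n (meetStep w)

def meet_alt (a : Int) (b : Int) : Int :=
  let d := b - a
  if d < 0 then 0
  else (meetIter d.toNat (0, 0, 0, 0, 0, 1)).2.2.2.2.2

-- ===== PRECONDITION & SPEC =====
-- Pre_ excludes inputs with b - a >= 19900: there A's depth-((b-a)/2) unmemoised recursion overflows the
-- interpreter's recursion limit and raises RecursionError (it never returns a value there), while B returns.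
def Pre_meet (a : Int) (b : Int) : Prop := b - a < 19900
instance (a : Int) (b : Int) : Decidable (Pre_meet a b) := by unfold Pre_meet; infer_instance
def pvWitness_meet : Int × Int := (0, 5)

def Spec_meet (a : Int) (b : Int) (out : Int) : Prop := out = meet_alt a b
instance (a : Int) (b : Int) (out : Int) : Decidable (Spec_meet a b out) := by unfold Spec_meet; infer_instance

-- ===== CLAIM (what is proved, stated in full; the proofs are below) =====
def Claim_equal_meet : Prop := ∀ (a : Int) (b : Int), Dom_meet a b → Pre_meet a b → Spec_meet a b (meet a b)

-- ===== LEMMAS AND PROOFS =====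

-- the common mathematical value: F d = number of ways, for d = b - a ≥ 0
def F : Nat → Int
  | 0 => 1
  | 1 => 0
  | 2 => 1
  | 3 => 2
  | 4 => 4
  | 5 => 6
  | (n+6) => F (n+4) + 2*F (n+3) + 3*F (n+2) + 2*F (n+1) + F n

-- F extended to Int (0 for negative arguments)
def G (k : Int) : Int := if k < 0 then 0 else F k.toNat

theorem G_neg {k : Int} (h : k < 0) : G k = 0 := by simp [G, h]

theorem G_rec (k : Int) (hk : 1 ≤ k) :
    G k = G (k-2) + 2*G (k-3) + 3*G (k-4) + 2*G (k-5) + G (k-6) := by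
  rcases lt_or_ge k 6 with h6 | h6
  · interval_cases k <;> decide
  · have h0 : ¬ k < 0 := by omega
    have e : k.toNat = (k.toNat - 6) + 6 := by omega
    simp only [G, h0, if_false]
    have hn : ∀ j : Int, (2:Int) ≤ j → j ≤ 6 → ¬ k - j < 0 := by intro j h1 h2; omega
    rw [if_neg (hn 2 (by norm_num) (by norm_num)), if_neg (hn 3 (by norm_num) (by norm_num)),
        if_neg (hn 4 (by norm_num) (by norm_num)), if_neg (hn 5 (by norm_num) (by norm_num)),
        if_neg (hn 6 (by norm_num) (by norm_num))]
    rw [e, F]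
    congr 1; congr 1; congr 1; congr 1
    · congr 1; omega
    · congr 2; omega
    · congr 2; omega
    · congr 2; omega
    · congr 1; omega

theorem pyRange14 : PySem.List.pyRange 1 4 1 = [1, 2, 3] := by decide

-- the fuel recursion computes G (b - a) whenever the fuel exceeds (b-a).toNat
theorem meetFuel_eq_G : ∀ (fuel : Nat) (a b : Int), (b - a).toNat < fuel →
    meetFuel fuel a b = G (b - a) := by
  intro fuel
  induction fuel with
  | zero => intro a b h; omega
  | succ n ih =>
    intro a b h
    rw [meetFuel]
    by_cases hgt : a > b
    · rw [if_pos hgt, G_neg (by omega)]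
    · rw [if_neg hgt]
      by_cases heq : a = b
      · subst heq; simp [G, F]
      · rw [if_neg heq]
        have hd : 1 ≤ b - a := by omega
        have hn : ∀ x y : Int, 1 ≤ x → x ≤ 3 → 1 ≤ y → y ≤ 3 →
            meetFuel n (a + x) (b - y) = G (b - a - x - y) := by
          intro x y hx1 hx3 hy1 hy3
          have : (b - y - (a + x)).toNat < n := by omega
          rw [ih _ _ this]; congr 1; ring
        rw [pyRange14]
        simp only [List.foldl]
        rw [hn 1 1 (by norm_num) (by norm_num) (by norm_num) (by norm_num),
            hn 1 2 (by norm_num) (by norm_num) (by norm_num) (by norm_num),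
            hn 1 3 (by norm_num) (by norm_num) (by norm_num) (by norm_num),
            hn 2 1 (by norm_num) (by norm_num) (by norm_num) (by norm_num),
            hn 2 2 (by norm_num) (by norm_num) (by norm_num) (by norm_num),
            hn 2 3 (by norm_num) (by norm_num) (by norm_num) (by norm_num),
            hn 3 1 (by norm_num) (by norm_num) (by norm_num) (by norm_num),
            hn 3 2 (by norm_num) (by norm_num) (by norm_num) (by norm_num),
            hn 3 3 (by norm_num) (by norm_num) (by norm_num) (by norm_num)]
        rw [G_rec (b - a) hd]
        have e2 : b - a - 1 - 1 = b - a - 2 := by ring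
        have e3 : b - a - 1 - 2 = b - a - 3 := by ring
        have e3' : b - a - 2 - 1 = b - a - 3 := by ring
        have e4 : b - a - 1 - 3 = b - a - 4 := by ring
        have e4' : b - a - 2 - 2 = b - a - 4 := by ring
        have e4'' : b - a - 3 - 1 = b - a - 4 := by ring
        have e5 : b - a - 2 - 3 = b - a - 5 := by ring
        have e5' : b - a - 3 - 2 = b - a - 5 := by ring
        have e6 : b - a - 3 - 3 = b - a - 6 := by ring
        rw [e2, e3, e3', e4, e4', e4'', e5, e5', e6]
        ring

-- the window invariant for B's iteration
theorem meetIter_succ : ∀ (k : Nat) (w : Int × Int × Int × Int × Int × Int),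
    meetIter (k+1) w = meetStep (meetIter k w) := by
  intro k
  induction k with
  | zero => intro w; rfl
  | succ j ihj =>
    intro w
    rw [show meetIter (j+1+1) w = meetIter (j+1) (meetStep w) from rfl, ihj]
    rfl

theorem meetIter_window : ∀ (n : Nat),
    meetIter n (0, 0, 0, 0, 0, 1) =
      (G ((n:Int) - 5), G ((n:Int) - 4), G ((n:Int) - 3), G ((n:Int) - 2), G ((n:Int) - 1), G (n:Int)) := by
  intro n
  induction n with
  | zero => simp [meetIter, G, F]
  | succ m ih =>
    rw [meetIter_succ, ih]
    simp only [meetStep]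
    have hrec := G_rec ((m:Int) + 1) (by omega)
    have e1 : ((m:Int) + 1) - 2 = (m:Int) - 1 := by ring
    have e2 : ((m:Int) + 1) - 3 = (m:Int) - 2 := by ring
    have e3 : ((m:Int) + 1) - 4 = (m:Int) - 3 := by ring
    have e4 : ((m:Int) + 1) - 5 = (m:Int) - 4 := by ring
    have e5 : ((m:Int) + 1) - 6 = (m:Int) - 5 := by ring
    rw [e1, e2, e3, e4, e5] at hrec
    have c1 : ((m+1 : Nat) : Int) - 5 = (m:Int) - 4 := by push_cast; ring
    have c2 : ((m+1 : Nat) : Int) - 4 = (m:Int) - 3 := by push_cast; ring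
    have c3 : ((m+1 : Nat) : Int) - 3 = (m:Int) - 2 := by push_cast; ring
    have c4 : ((m+1 : Nat) : Int) - 2 = (m:Int) - 1 := by push_cast; ring
    have c5 : ((m+1 : Nat) : Int) - 1 = (m:Int) := by push_cast; ring
    have c6 : ((m+1 : Nat) : Int) = (m:Int) + 1 := by push_cast; ring
    rw [c1, c2, c3, c4, c5, c6, hrec]

-- ===== VERDICT (by name: the statement is the Claim_ definition above) =====
theorem meet_spec : Claim_equal_meet := by
  intro a b _ _
  unfold Spec_meet meet meet_alt
  rw [meetFuel_eq_G _ a b (by omega)]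
  by_cases h : b - a < 0
  · simp only [h, if_true, G_neg h]
  · simp only [h, if_false]
    rw [meetIter_window]
    have e : (((b - a).toNat : Int)) = b - a := by omega
    rw [e]
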